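-- pv_equiv track=rewrite | github.com/cirosantilli/project-euler-solvers | solvers/148.py | solve
-- ===== SOURCE A (Python) =====
-- MODULO = 7
--
-- def solve(num_rows: int) -> int:
--     base7 = [1] * 12
--     count = 1
--
--     for _ in range(1, num_rows):
--         base7[0] += 1
--         carry_pos = 0
--         while base7[carry_pos] == MODULO + 1:
--             base7[carry_pos] = 1
--             base7[carry_pos + 1] += 1
--             carry_pos += 1
--
--         found = 1
--         for x in base7:
--             found *= x
--         count += found
--
--     return count
-- ===== SOURCE B (Python) =====
-- MODULO = 7
--
-- def solve(num_rows: int) -> int: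
--     # Base-7 digit DP: the count for row r is prod(d+1) over r's base-7 digits,
--     # so the running total over rows 0..n-1 has a closed Horner form over n's digits.
--     n = max(num_rows, 1)
--     digits = []
--     while n:
--         n, d = divmod(n, MODULO)
--         digits.append(d)
--     total, prefix = 0, 1
--     for d in reversed(digits):
--         total = total * (MODULO * (MODULO + 1) // 2) + prefix * d * (d + 1) // 2
--         prefix *= d + 1
--     return total
-- ===== Notes on version B (the rewrite author's own statement) =====
-- stated objective: faster
-- what changed: Replaces the row-by-row base-7 odometer loop (one iteration per row) by a digit DP over the base-7 digits of num_rows, summing whole digit-blocks in closed form in a single Horner pass.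
import Mathlib
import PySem

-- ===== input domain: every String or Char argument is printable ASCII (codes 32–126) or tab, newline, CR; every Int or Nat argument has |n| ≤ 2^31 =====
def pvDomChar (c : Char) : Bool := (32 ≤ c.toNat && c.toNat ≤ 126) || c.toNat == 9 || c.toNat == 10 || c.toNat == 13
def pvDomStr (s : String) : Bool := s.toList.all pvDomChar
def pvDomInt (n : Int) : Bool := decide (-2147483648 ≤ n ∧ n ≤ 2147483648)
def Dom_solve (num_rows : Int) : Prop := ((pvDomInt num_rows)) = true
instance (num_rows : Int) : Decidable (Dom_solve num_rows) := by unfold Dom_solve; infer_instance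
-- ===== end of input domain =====

-- B replaces A's row-by-row base-7 odometer with a digit DP over num_rows's base-7
-- digits (one Horner pass over O(log n) digits); objective: faster.

-- ===== PORT A =====
-- the inner 'while base7[carry_pos] == MODULO + 1' carry loop; recursion on the
-- remaining length of the list (the position only moves right).  Out-of-range
-- access (never reached for |num_rows| ≤ 2^31 < 7^12) ends the loop.
def pvCarry (l : List Int) (pos : Nat) : List Int :=
  if h : pos < l.length then
    if l[pos] = 7 + 1 then
      let l1 := l.set pos 1
      pvCarry (l1.set (pos + 1) (l1.getD (pos + 1) 0 + 1)) (pos + 1)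
    else l
  else l
  termination_by l.length - pos
  decreasing_by simp_all; omega

-- one iteration of 'for _ in range(1, num_rows)': base7[0] += 1; carry; found = prod; count += found
def pvStepA (st : List Int × Int) (_i : Int) : List Int × Int :=
  let b1 := st.1.set 0 (st.1.getD 0 0 + 1)
  let b2 := pvCarry b1 0
  let found := b2.foldl (· * ·) 1
  (b2, st.2 + found)

def solve (num_rows : Int) : Int :=
  ((PySem.List.pyRange 1 num_rows 1).foldl pvStepA (List.replicate 12 1, 1)).2

-- ===== PORT B =====
-- 'while n: n, d = divmod(n, 7); digits.append(d)' — LSB-first digit list.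
-- (guard written as 0 < n: B only calls it with n ≥ 1, where 'n ≠ 0' agrees)
def pvDigits (n : Int) : List Int :=
  if _h : 0 < n then PySem.Int.mod n 7 :: pvDigits (PySem.Int.floordiv n 7)
  else []
  termination_by n.toNat
  decreasing_by
    have h2 : PySem.Int.floordiv n 7 = n / 7 := PySem.Int.floordiv_eq_ediv_of_pos (by omega)
    rw [h2]; omega

-- 'for d in reversed(digits): total = total*28 + prefix*d*(d+1)//2; prefix *= d+1'
def pvStepB (st : Int × Int) (d : Int) : Int × Int :=
  (st.1 * (7 * (7 + 1) / 2) + PySem.Int.floordiv (st.2 * d * (d + 1)) 2, st.2 * (d + 1))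

def solve_alt (num_rows : Int) : Int :=
  let n := max num_rows 1
  let digits := pvDigits n
  (digits.reverse.foldl pvStepB (0, 1)).1

-- ===== PRECONDITION & SPEC =====
def Spec_solve (num_rows : Int) (out : Int) : Prop := out = solve_alt num_rows
instance (num_rows : Int) (out : Int) : Decidable (Spec_solve num_rows out) := by unfold Spec_solve; infer_instance

-- ===== CLAIM (what is proved, stated in full; the proofs are below) =====
def Claim_equal_solve : Prop := ∀ (num_rows : Int), Dom_solve num_rows → Spec_solve num_rows (solve num_rows)

-- ===== LEMMAS AND PROOFS =====

-- product of (digit+1) over the base-7 digits of k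
def pvF (k : Nat) : Int :=
  if 0 < k then (((k % 7 : Nat) : Int) + 1) * pvF (k / 7) else 1

-- sum of pvF over rows 0..n-1
def pvS (n : Nat) : Int := ((List.range n).map pvF).sum

lemma pvF_step (q d : Nat) (hd : d < 7) : pvF (7 * q + d) = ((d : Int) + 1) * pvF q := by
  by_cases h : 0 < 7 * q + d
  · rw [pvF, if_pos h]
    have h1 : (7 * q + d) % 7 = d := by omega
    have h2 : (7 * q + d) / 7 = q := by omega
    rw [h1, h2]
  · have hq : q = 0 := by omega
    have hd0 : d = 0 := by omega
    subst hq; subst hd0; simp [pvF]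

lemma pvS_succ (n : Nat) : pvS (n + 1) = pvS n + pvF n := by
  simp [pvS, List.range_succ]

lemma pvS_mul7 (q : Nat) : pvS (7 * q) = 28 * pvS q := by
  induction q with
  | zero => simp [pvS]
  | succ q ih =>
    have : 7 * (q + 1) = 7 * q + 1 + 1 + 1 + 1 + 1 + 1 + 1 := by ring
    rw [this]
    rw [pvS_succ, pvS_succ, pvS_succ, pvS_succ, pvS_succ, pvS_succ, pvS_succ, ih, pvS_succ]
    have e0 : 7 * q + 0 = 7 * q := by ring
    have h0 := pvF_step q 0 (by omega)
    have h1 := pvF_step q 1 (by omega)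
    have h2 := pvF_step q 2 (by omega)
    have h3 := pvF_step q 3 (by omega)
    have h4 := pvF_step q 4 (by omega)
    have h5 := pvF_step q 5 (by omega)
    have h6 := pvF_step q 6 (by omega)
    rw [e0] at h0
    rw [show 7*q+1+1 = 7*q+2 by ring, show 7*q+1+1+1 = 7*q+3 by ring,
        show 7*q+1+1+1+1 = 7*q+4 by ring, show 7*q+1+1+1+1+1 = 7*q+5 by ring,
        show 7*q+1+1+1+1+1+1 = 7*q+6 by ring]
    rw [h0, h1, h2, h3, h4, h5, h6]
    push_cast
    ring

-- triangular number as an Int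
def pvT (r : Nat) : Int := ((r * (r + 1) / 2 : Nat) : Int)

lemma pvS_div_mod (q r : Nat) (hr : r < 7) :
    pvS (7 * q + r) = 28 * pvS q + pvF q * pvT r := by
  induction r with
  | zero => simp [pvS_mul7, pvT]
  | succ r ih =>
    have hr' : r < 7 := by omega
    rw [show 7 * q + (r + 1) = (7 * q + r) + 1 by ring, pvS_succ, ih hr',
        pvF_step q r hr']
    have : pvT (r + 1) = pvT r + ((r : Int) + 1) := by
      unfold pvT
      obtain ⟨t, ht⟩ := Nat.even_mul_succ_self r
      have e1 : (r + 1) * (r + 1 + 1) = r * (r + 1) + 2 * (r + 1) := by ring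
      have : (r + 1) * (r + 1 + 1) / 2 = r * (r + 1) / 2 + (r + 1) := by omega
      rw [this]; push_cast; ring
    rw [this]; ring

-- pvDigits on a natural number
lemma pvDigits_natCast (m : Nat) :
    pvDigits (m : Int) = if 0 < m then ((m % 7 : Nat) : Int) :: pvDigits ((m / 7 : Nat) : Int) else [] := by
  rw [pvDigits]
  by_cases h : 0 < m
  · rw [dif_pos (by exact_mod_cast h), if_pos h]
    have h1 : PySem.Int.mod (m : Int) 7 = ((m % 7 : Nat) : Int) := by
      exact_mod_cast PySem.Int.mod_natCast m 7
    have h2 : PySem.Int.floordiv (m : Int) 7 = ((m / 7 : Nat) : Int) := by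
      exact_mod_cast PySem.Int.floordiv_natCast m 7
    rw [h1, h2]
  · rw [dif_neg (by exact_mod_cast h), if_neg h]

-- the Horner step computes exactly: floordiv (p*d*(d+1)) 2 = p * pvT d
lemma pvStepB_arith (p : Int) (d : Nat) :
    PySem.Int.floordiv (p * (d : Int) * ((d : Int) + 1)) 2 = p * pvT d := by
  have he : (d * (d + 1) : Nat) = 2 * (d * (d + 1) / 2) := by
    obtain ⟨t, ht⟩ := Nat.even_mul_succ_self d
    omega
  have : p * (d : Int) * ((d : Int) + 1) = 2 * (p * pvT d) := by
    unfold pvT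
    have : (d : Int) * ((d : Int) + 1) = 2 * ((d * (d + 1) / 2 : Nat) : Int) := by
      exact_mod_cast congrArg (fun x : Nat => (x : Int)) he
    calc p * (d : Int) * ((d : Int) + 1) = p * ((d : Int) * ((d : Int) + 1)) := by ring
      _ = p * (2 * ((d * (d + 1) / 2 : Nat) : Int)) := by rw [this]
      _ = 2 * (p * ((d * (d + 1) / 2 : Nat) : Int)) := by ring
  rw [this, PySem.Int.floordiv_eq_ediv_of_pos (by norm_num), Int.mul_ediv_cancel_left _ (by norm_num)]

-- Horner pass over the reversed digit list = (pvS m, pvF m)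
lemma pvHorner (m : Nat) :
    (pvDigits (m : Int)).reverse.foldl pvStepB (0, 1) = (pvS m, pvF m) := by
  induction m using Nat.strong_induction_on with
  | _ m ih =>
    rw [pvDigits_natCast]
    by_cases h : 0 < m
    · rw [if_pos h]
      have hq : m / 7 < m := Nat.div_lt_self h (by norm_num)
      rw [List.reverse_cons, List.foldl_append, ih (m / 7) hq]
      have hconj : m = 7 * (m / 7) + m % 7 := by omega
      simp only [List.foldl_cons, List.foldl_nil, pvStepB, pvStepB_arith]
      have h1 := pvS_div_mod (m / 7) (m % 7) (by omega)
      rw [← hconj] at h1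
      have h2 := pvF_step (m / 7) (m % 7) (by omega)
      rw [← hconj] at h2
      rw [Prod.ext_iff]
      refine ⟨?_, ?_⟩
      · show pvS (m / 7) * (7 * (7 + 1) / 2) + pvF (m / 7) * pvT (m % 7) = pvS m
        rw [h1]; norm_num; ring
      · show pvF (m / 7) * (((m % 7 : Nat) : Int) + 1) = pvF m
        rw [h2]; ring
    · rw [if_neg h]
      have hm : m = 0 := by omega
      subst hm
      simp [pvS, pvF]

-- ===== A-side: the odometer invariant =====

-- i-th base-7 digit of k
def pvDig (k i : Nat) : Nat := k / 7 ^ i % 7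

-- the 12-entry digit+1 vector A's loop maintains
def pvDv (k : Nat) : List Int := (List.range 12).map (fun i => ((pvDig k i : Nat) : Int) + 1)

-- the list mid-carry: positions < j reset to 1, position j holds the pending +2
def pvL (k j : Nat) : List Int :=
  (List.range 12).map (fun i =>
    if i < j then 1 else if i = j then ((pvDig k i : Nat) : Int) + 2 else ((pvDig k i : Nat) : Int) + 1)

lemma pvDig_lt (k i : Nat) : pvDig k i < 7 := Nat.mod_lt _ (by norm_num)

lemma pvDv_zero : pvDv 0 = List.replicate 12 1 := by decide

lemma pvF_unfold (k : Nat) : pvF k = (((k % 7 : Nat) : Int) + 1) * pvF (k / 7) := by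
  by_cases h : 0 < k
  · rw [pvF, if_pos h]
  · have : k = 0 := by omega
    subst this; simp [pvF]

lemma pvDig_succ (k i : Nat) : pvDig k (i + 1) = pvDig (k / 7) i := by
  unfold pvDig
  rw [Nat.div_div_eq_div_mul, pow_succ, mul_comm (7 ^ i) 7, mul_comm 7 (7 ^ i)]

lemma pvProd_aux (n : Nat) : ∀ k, k < 7 ^ n →
    ((List.range n).map (fun i => ((pvDig k i : Nat) : Int) + 1)).foldl (· * ·) 1 = pvF k := by
  induction n with
  | zero =>
    intro k hk
    have : k = 0 := by simpa using hk
    subst this; simp [pvF]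
  | succ n ih =>
    intro k hk
    rw [← List.prod_eq_foldl, List.range_succ_eq_map, List.map_cons, List.prod_cons,
        List.map_map]
    have hmap : ((fun i => ((pvDig k i : Nat) : Int) + 1) ∘ Nat.succ)
        = fun i => ((pvDig (k / 7) i : Nat) : Int) + 1 := by
      funext i
      simp [Function.comp, pvDig_succ]
    rw [hmap, List.prod_eq_foldl, ih (k / 7) (by
      have h7 : (7:Nat) ^ (n+1) = 7 ^ n * 7 := by ring
      rw [h7] at hk
      omega)]
    have h0 : pvDig k 0 = k % 7 := by unfold pvDig; simp
    rw [h0, ← pvF_unfold]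

lemma pvDv_prod (k : Nat) (hk : k < 7 ^ 12) : (pvDv k).foldl (· * ·) 1 = pvF k :=
  pvProd_aux 12 k hk

lemma pvMod_all6 (k j : Nat) (h : ∀ i, i < j → pvDig k i = 6) : k % 7 ^ j = 7 ^ j - 1 := by
  induction j with
  | zero => simp [Nat.mod_one]
  | succ j ih =>
    have h6 : k / 7 ^ j % 7 = 6 := h j (by omega)
    have hih := ih (fun i hi => h i (by omega))
    rw [Nat.mod_pow_succ, hih, h6]
    have hp : (7:Nat) ^ (j+1) = 7 ^ j * 7 := by ring
    have hpos : 0 < (7:Nat) ^ j := by positivity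
    omega

lemma pvNotAll6 (k : Nat) (hk : k + 1 < 7 ^ 12) (h : ∀ i, i < 12 → pvDig k i = 6) : False := by
  have hm := pvMod_all6 k 12 h
  have hlt : k < 7 ^ 12 := by omega
  have := Nat.mod_eq_of_lt hlt
  have hv : (7:Nat) ^ 12 = 13841287201 := by norm_num
  omega

lemma pvDivStable (s q : Nat) (hq : q % 7 ≤ 5) : (q + 1) / 7 ^ (s + 1) = q / 7 ^ (s + 1) := by
  have h1 : (q + 1) / 7 = q / 7 := by omega
  rw [pow_succ, mul_comm, ← Nat.div_div_eq_div_mul, ← Nat.div_div_eq_div_mul, h1]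

lemma pvInc (k j : Nat) (h6 : ∀ i, i < j → pvDig k i = 6) (hj : pvDig k j ≠ 6) :
    (∀ i, i < j → pvDig (k + 1) i = 0) ∧ pvDig (k + 1) j = pvDig k j + 1 ∧
      (∀ i, j < i → pvDig (k + 1) i = pvDig k i) := by
  have hmod := pvMod_all6 k j h6
  have hpos : 0 < (7:Nat) ^ j := by positivity
  have hdm := Nat.div_add_mod k (7 ^ j)
  have hE : k + 1 = 7 ^ j * (k / 7 ^ j + 1) := by
    have : 7 ^ j * (k / 7 ^ j + 1) = 7 ^ j * (k / 7 ^ j) + 7 ^ j := by ring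
    omega
  have hq7 : k / 7 ^ j % 7 ≤ 5 := by
    have h1 : pvDig k j < 7 := pvDig_lt k j
    unfold pvDig at h1 hj
    omega
  refine ⟨?_, ?_, ?_⟩
  · intro i hi
    unfold pvDig
    have hsplit : (7:Nat) ^ j = 7 ^ i * 7 ^ (j - i) := by
      rw [← pow_add]; congr 1; omega
    have hdiv : (k + 1) / 7 ^ i = 7 ^ (j - i) * (k / 7 ^ j + 1) := by
      rw [hE, hsplit, mul_assoc, Nat.mul_div_cancel_left _ (by positivity : 0 < (7:Nat) ^ i)]
    obtain ⟨t, ht⟩ : 7 ∣ (7:Nat) ^ (j - i) := dvd_pow_self 7 (by omega)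
    rw [hdiv, ht, mul_assoc, Nat.mul_mod_right]
  · unfold pvDig
    have hdiv : (k + 1) / 7 ^ j = k / 7 ^ j + 1 := by
      rw [hE, Nat.mul_div_cancel_left _ hpos]
    rw [hdiv]
    omega
  · intro i hi
    unfold pvDig
    have hsplit : (7:Nat) ^ i = 7 ^ j * 7 ^ (i - j) := by
      rw [← pow_add]; congr 1; omega
    have hd1 : (k + 1) / 7 ^ i = (k / 7 ^ j + 1) / 7 ^ (i - j) := by
      rw [hE, hsplit, Nat.mul_div_mul_left _ _ hpos]
    have hd2 : k / 7 ^ i = (k / 7 ^ j) / 7 ^ (i - j) := by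
      rw [hsplit, ← Nat.div_div_eq_div_mul]
    have hij : i - j = (i - j - 1) + 1 := by omega
    rw [hd1, hd2, hij, pvDivStable _ _ hq7]
lemma pvL_length (k j : Nat) : (pvL k j).length = 12 := by simp [pvL]

lemma pvL_getElem (k j i : Nat) (hi : i < 12) :
    (pvL k j)[i]'(by rw [pvL_length]; exact hi) =
      (if i < j then 1 else if i = j then ((pvDig k i : Nat) : Int) + 2
       else ((pvDig k i : Nat) : Int) + 1) := by
  simp [pvL]

lemma pvCarry_loop (c : Nat) : ∀ j k, 12 - j ≤ c → k + 1 < 7 ^ 12 → j < 12 →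
    (∀ i, i < j → pvDig k i = 6) → pvCarry (pvL k j) j = pvDv (k + 1) := by
  induction c with
  | zero => intro j k hc hk hj h6; omega
  | succ c ih =>
    intro j k hc hk hj h6
    rw [pvCarry, dif_pos (by rw [pvL_length]; exact hj)]
    dsimp only
    have hval : (pvL k j)[j]'(by rw [pvL_length]; exact hj) = ((pvDig k j : Nat) : Int) + 2 := by
      rw [pvL_getElem k j j hj]; simp
    by_cases hd : pvDig k j = 6
    · rw [if_pos (by rw [hval, hd]; norm_num)]
      have hj1 : j + 1 < 12 := by
        by_contra hj1
        apply pvNotAll6 k hk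
        intro i hi
        rcases Nat.lt_or_ge i j with h | h
        · exact h6 i h
        · have : i = j := by omega
          rw [this, hd]
      have hv : ((pvL k j).set j 1).getD (j + 1) 0 = ((pvDig k (j + 1) : Nat) : Int) + 1 := by
        have hlt : j + 1 < ((pvL k j).set j 1).length := by
          rw [List.length_set, pvL_length]; exact hj1
        rw [List.getD_eq_getElem _ _ hlt, List.getElem_set]
        rw [if_neg (by omega)]
        rw [pvL_getElem k j (j + 1) hj1]
        rw [if_neg (by omega), if_neg (by omega)]
      have hset : ((pvL k j).set j 1).set (j + 1) (((pvL k j).set j 1).getD (j + 1) 0 + 1)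
          = pvL k (j + 1) := by
        rw [hv]
        apply List.ext_getElem (by simp [pvL_length])
        intro i h1 h2
        rw [List.getElem_set, List.getElem_set]
        have hi12 : i < 12 := by
          have := h2; rw [pvL_length] at this; exact this
        rw [pvL_getElem k (j + 1) i hi12]
        by_cases e1 : j + 1 = i
        · rw [if_pos e1, if_neg (by omega), if_pos (by omega), ← e1]
          ring
        · rw [if_neg e1]
          by_cases e2 : j = i
          · rw [if_pos e2, if_pos (by omega)]
          · rw [if_neg e2, pvL_getElem k j i hi12]
            by_cases e3 : i < j
            · rw [if_pos e3, if_pos (by omega)]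
            · rw [if_neg e3, if_neg (by omega), if_neg (by omega), if_neg (by omega)]
      rw [hset]
      exact ih (j + 1) k (by omega) hk hj1 (fun i hi => by
        rcases Nat.lt_or_ge i j with h | h
        · exact h6 i h
        · have : i = j := by omega
          rw [this, hd])
    · rw [if_neg (by
        rw [hval]
        intro hcon
        apply hd
        have : ((pvDig k j : Nat) : Int) = 6 := by omega
        exact_mod_cast this)]
      obtain ⟨ha, hb, hc'⟩ := pvInc k j h6 hd
      apply List.ext_getElem (by simp [pvL_length, pvDv])
      intro i h1 h2
      have hi12 : i < 12 := by
        have := h1; rw [pvL_length] at this; exact this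
      rw [pvL_getElem k j i hi12]
      have hDv : (pvDv (k + 1))[i]'(h2) = ((pvDig (k + 1) i : Nat) : Int) + 1 := by
        simp [pvDv]
      rw [hDv]
      rcases lt_trichotomy i j with h | h | h
      · rw [if_pos h, ha i h]; norm_num
      · subst h
        rw [if_neg (by omega), if_pos rfl, hb]
        push_cast; ring
      · rw [if_neg (by omega), if_neg (by omega), hc' i h]

lemma pvStepA_eq (k : Nat) (c x : Int) (hk : k + 1 < 7 ^ 12) :
    pvStepA (pvDv k, c) x = (pvDv (k + 1), c + pvF (k + 1)) := by
  unfold pvStepA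
  dsimp only
  have hset : (pvDv k).set 0 ((pvDv k).getD 0 0 + 1) = pvL k 0 := by
    apply List.ext_getElem (by simp [pvDv, pvL_length])
    intro i h1 h2
    have hi12 : i < 12 := by
      have := h2; rw [pvL_length] at this; exact this
    rw [List.getElem_set, pvL_getElem k 0 i hi12]
    have hgd : (pvDv k).getD 0 0 = ((pvDig k 0 : Nat) : Int) + 1 := by
      have hlt : 0 < (pvDv k).length := by simp [pvDv]
      rw [List.getD_eq_getElem _ _ hlt]
      simp [pvDv]
    by_cases e : 0 = i
    · subst e
      rw [if_pos rfl, if_neg (by omega), if_pos rfl, hgd]; ring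
    · rw [if_neg e, if_neg (by omega), if_neg (by omega)]
      simp [pvDv]
  rw [hset, pvCarry_loop 12 0 k (by omega) hk (by omega) (by omega),
      pvDv_prod (k + 1) hk]

lemma pvF_zero : pvF 0 = 1 := by rw [pvF]; norm_num

lemma pvS_one : pvS 1 = 1 := by
  have : List.range 1 = [0] := rfl
  rw [pvS, this]
  simp [pvF_zero]

lemma pvOuter (n : Nat) (h1 : 1 ≤ n) (h2 : n ≤ 7 ^ 12) :
    (PySem.List.pyRange 1 (n : Int) 1).foldl pvStepA (List.replicate 12 1, 1)
      = (pvDv (n - 1), pvS n) := by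
  induction n, h1 using Nat.le_induction with
  | base =>
    rw [show ((1 : Nat) : Int) = 1 by norm_num, PySem.List.pyRange_one_eq_nil le_rfl]
    rw [List.foldl_nil, pvDv_zero, pvS_one]
  | succ n hn ih =>
    have hcast : ((n + 1 : Nat) : Int) = (n : Int) + 1 := by push_cast; ring
    rw [hcast, PySem.List.pyRange_one_succ_right (by exact_mod_cast hn),
        List.foldl_append, ih (by omega), List.foldl_cons, List.foldl_nil]
    have hk : (n - 1) + 1 = n := by omega
    have := pvStepA_eq (n - 1) (pvS n) (n : Int) (by rw [hk]; omega)
    rw [hk] at this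
    rw [this, ← pvS_succ, Nat.add_sub_cancel]
-- ===== VERDICT (by name: the statement is the Claim_ definition above) =====
theorem solve_spec : Claim_equal_solve := by
  intro num_rows hdom
  show solve num_rows = solve_alt num_rows
  have hdom' : -2147483648 ≤ num_rows ∧ num_rows ≤ 2147483648 := by
    simpa [Dom_solve, pvDomInt] using hdom
  by_cases hpos : 1 ≤ num_rows
  · set n := num_rows.toNat with hn
    have hcast : (n : Int) = num_rows := Int.toNat_of_nonneg (by omega)
    have h1 : 1 ≤ n := by omega
    have h2 : n ≤ 7 ^ 12 := by
      have : (7:Nat) ^ 12 = 13841287201 := by norm_num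
      omega
    rw [solve, solve_alt, ← hcast]
    rw [pvOuter n h1 h2]
    rw [max_eq_left (by exact_mod_cast h1), pvHorner n]
  · have hle : num_rows ≤ 1 := by omega
    rw [solve, solve_alt, PySem.List.pyRange_one_eq_nil hle, List.foldl_nil]
    rw [max_eq_right (by omega)]
    have e : pvDigits (1 : Int) = pvDigits ((1 : Nat) : Int) := by norm_num
    rw [e, pvHorner 1]
    show (1 : Int) = pvS 1
    rw [pvS_one]
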